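-- pv_equiv track=rewrite | github.com/MojtabaMaleki02/Tic-Tac-Toe-With-AI | tictactoe.py | checkFirstDig
-- ===== SOURCE A (Python) =====
-- def checkFirstDig(board, player):
--     count = 0
--
--     for row in range(len(board)):
--         for column in range(len(board[row])):
--             if row == column and board[row][column]==player:
--                 count += 1
--
--     if count == 3:
--         return True
--     else:
--         return False
-- ===== SOURCE B (Python) =====
-- def checkFirstDig(board, player):
--     count = sum(1 for i, row in enumerate(board) if i < len(row) and row[i] == player)
--     return count == 3
-- ===== Notes on version B (the rewrite author's own statement) =====
-- stated objective: simpler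
-- what changed: Replaces the nested row/column scan of the whole grid with a single enumerate pass that inspects only the diagonal cell of each row (guarded by i < len(row)), summing matches and comparing to the literal 3.
import Mathlib
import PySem

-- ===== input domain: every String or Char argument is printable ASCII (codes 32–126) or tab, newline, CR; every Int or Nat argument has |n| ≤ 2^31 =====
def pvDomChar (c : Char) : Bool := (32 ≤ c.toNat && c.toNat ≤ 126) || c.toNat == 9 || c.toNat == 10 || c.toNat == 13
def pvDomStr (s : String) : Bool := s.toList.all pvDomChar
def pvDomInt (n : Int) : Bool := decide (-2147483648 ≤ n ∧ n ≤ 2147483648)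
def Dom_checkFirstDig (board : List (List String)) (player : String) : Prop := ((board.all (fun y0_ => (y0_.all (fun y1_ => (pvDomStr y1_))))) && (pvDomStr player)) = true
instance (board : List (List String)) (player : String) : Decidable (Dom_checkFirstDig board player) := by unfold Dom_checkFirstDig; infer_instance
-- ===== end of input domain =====

-- B replaces A's nested full-grid scan with a single enumerate pass over the rows
-- that inspects only the diagonal cell of each row (objective: simpler).

-- ===== PORT A =====
-- nested loops: for row in range(len(board)): for column in range(len(board[row])): …
def checkFirstDig (board : List (List String)) (player : String) : Bool :=
  let count : Int :=
    (PySem.List.pyRange 0 (PySem.List.len board) 1).foldl (fun count row =>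
      (PySem.List.pyRange 0 (PySem.List.len (PySem.List.pyGetD board row [])) 1).foldl
        (fun count column =>
          if row = column ∧
             PySem.List.pyGetD (PySem.List.pyGetD board row []) column "" = player
          then count + 1 else count) count) 0
  if count = 3 then true else false

-- ===== PORT B =====
-- sum(1 for i, row in enumerate(board) if i < len(row) and row[i] == player) == 3
def checkFirstDig_alt (board : List (List String)) (player : String) : Bool :=
  let count : Nat :=
    (PySem.List.enumerate board 0).countP
      (fun p => decide (p.1 < PySem.List.len p.2 ∧ PySem.List.pyGetD p.2 p.1 "" = player))
  decide (count = 3)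

-- ===== PRECONDITION & SPEC =====
def Spec_checkFirstDig (board : List (List String)) (player : String) (out : Bool) : Prop := out = checkFirstDig_alt board player
instance (board : List (List String)) (player : String) (out : Bool) : Decidable (Spec_checkFirstDig board player out) := by unfold Spec_checkFirstDig; infer_instance

-- ===== CLAIM (what is proved, stated in full; the proofs are below) =====
def Claim_equal_checkFirstDig : Prop := ∀ (board : List (List String)) (player : String), Dom_checkFirstDig board player → Spec_checkFirstDig board player (checkFirstDig board player)

-- ===== LEMMAS AND PROOFS =====

-- countP of "equals i and Q" over a Nodup list is an indicator
theorem countP_eq_ind {α : Type} [DecidableEq α] (l : List α) (hl : l.Nodup) (i : α)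
    (Q : α → Prop) [DecidablePred Q] :
    l.countP (fun x => decide (i = x ∧ Q x)) = if i ∈ l ∧ Q i then 1 else 0 := by
  induction l with
  | nil => simp
  | cons a t ih =>
    rcases List.nodup_cons.mp hl with ⟨ha, ht⟩
    rw [List.countP_cons, ih ht]
    by_cases hia : i = a
    · subst hia
      simp [ha]
    · simp [hia]

-- A's inner column loop adds the diagonal indicator for row i (i ≥ 0)
theorem inner_fold (r : List String) (player : String) (i c : Int) (hi : 0 ≤ i) :
    (PySem.List.pyRange 0 (PySem.List.len r) 1).foldl
      (fun c col => if i = col ∧ PySem.List.pyGetD r col "" = player then c + 1 else c) c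
    = c + (if i < PySem.List.len r ∧ PySem.List.pyGetD r i "" = player then 1 else 0) := by
  rw [PySem.List.foldl_ite_add_one]
  rw [countP_eq_ind _ (PySem.List.nodup_pyRange_one 0 (PySem.List.len r))]
  simp only [PySem.List.mem_pyRange_one]
  by_cases h : i < PySem.List.len r ∧ PySem.List.pyGetD r i "" = player
  · simp [h, hi]
  · rw [if_neg h, if_neg (by tauto)]
    simp

theorem checkFirstDig_eq (board : List (List String)) (player : String) :
    checkFirstDig board player = checkFirstDig_alt board player := by
  simp only [checkFirstDig, checkFirstDig_alt]
  have hcong :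
      (PySem.List.pyRange 0 (PySem.List.len board) 1).foldl (fun count row =>
        (PySem.List.pyRange 0 (PySem.List.len (PySem.List.pyGetD board row [])) 1).foldl
          (fun count column =>
            if row = column ∧
               PySem.List.pyGetD (PySem.List.pyGetD board row []) column "" = player
            then count + 1 else count) count) (0 : Int)
      = (PySem.List.pyRange 0 (PySem.List.len board) 1).foldl (fun count row =>
          if row < PySem.List.len (PySem.List.pyGetD board row []) ∧
             PySem.List.pyGetD (PySem.List.pyGetD board row []) row "" = player
          then count + 1 else count) (0 : Int) := by
    apply PySem.List.foldl_congr_mem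
    intro c row hrow
    have h0 : 0 ≤ row := (PySem.List.mem_pyRange_one.mp hrow).1
    rw [inner_fold _ player row c h0]
    split_ifs <;> simp
  rw [hcong, PySem.List.foldl_ite_add_one]
  rw [PySem.List.enumerate_eq_map_pyRange board ([] : List String), List.countP_map]
  have : ((fun p : Int × List String =>
            decide (p.1 < PySem.List.len p.2 ∧ PySem.List.pyGetD p.2 p.1 "" = player)) ∘
          (fun j => (j, PySem.List.pyGetD board j [])))
        = (fun row => decide (row < PySem.List.len (PySem.List.pyGetD board row []) ∧
            PySem.List.pyGetD (PySem.List.pyGetD board row []) row "" = player)) := by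
    funext j; rfl
  rw [this]
  set n := (PySem.List.pyRange 0 (PySem.List.len board) 1).countP
      (fun row => decide (row < PySem.List.len (PySem.List.pyGetD board row []) ∧
        PySem.List.pyGetD (PySem.List.pyGetD board row []) row "" = player)) with hn
  simp only [zero_add]
  by_cases h3 : n = 3
  · simp [h3]
  · rw [if_neg (by exact_mod_cast h3)]
    simp [h3]

-- ===== VERDICT (by name: the statement is the Claim_ definition above) =====
theorem checkFirstDig_spec : Claim_equal_checkFirstDig := by
  intro board player _
  unfold Spec_checkFirstDig
  exact checkFirstDig_eq board player
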